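-- pv_equiv track=rewrite | github.com/daniel-reich/turbo-robot | ke4FSMdG2XYxbGQny_11.py | even_odd_transform
-- ===== SOURCE A (Python) =====
-- def even_odd_transform(lst, n):
--   return_list = lst
--   for i in range(n):
--     for index, number in enumerate(lst):
--       if number % 2 == 0:
--         return_list[index] = number - 2
--       else:
--         return_list[index] = number + 2
--   return return_list
-- ===== SOURCE B (Python) =====
-- def even_odd_transform(lst, n):
--   # NOTE: A mutates lst in place; equivalence proved is about the return value.
--   k = 2 * n if n > 0 else 0
--   return [x - k if x % 2 == 0 else x + k for x in lst]
-- ===== Notes on version B (the rewrite author's own statement) =====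
-- stated objective: faster
-- what changed: Replaces A's n full in-place sweeps over the list by a single pass using the closed form even -> x-2n, odd -> x+2n (parity is invariant under +-2); A's in-place mutation of lst is not reproduced, the return value is identical.
import Mathlib
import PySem

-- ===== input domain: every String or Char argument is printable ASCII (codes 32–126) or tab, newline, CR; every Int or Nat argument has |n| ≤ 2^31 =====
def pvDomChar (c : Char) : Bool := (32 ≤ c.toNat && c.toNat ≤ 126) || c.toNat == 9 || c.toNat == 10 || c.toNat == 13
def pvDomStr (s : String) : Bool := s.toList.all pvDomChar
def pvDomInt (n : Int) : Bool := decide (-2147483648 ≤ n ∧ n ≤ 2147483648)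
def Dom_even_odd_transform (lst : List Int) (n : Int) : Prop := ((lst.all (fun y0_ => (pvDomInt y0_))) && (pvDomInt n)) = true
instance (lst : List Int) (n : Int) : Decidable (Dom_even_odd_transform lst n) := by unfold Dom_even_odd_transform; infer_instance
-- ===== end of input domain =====

-- B replaces A's n sweeps over the list by the closed form even→x-2n, odd→x+2n (parity is invariant);
-- A mutates lst in place, B does not: the equivalence proved is about the RETURN value only.

-- ===== PORT A =====
-- Python's `enumerate(lst)` iterates over the LIVE list (return_list aliases lst),
-- so the inner loop is ported by index, reading the current accumulator; this is exact
-- because each read at `index` happens before the write at `index`, and the length never changes.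
def even_odd_transform (lst : List Int) (n : Int) : List Int :=
  (PySem.List.pyRange 0 n 1).foldl
    (fun return_list _ =>
      (PySem.List.pyRange 0 (return_list.length : Int) 1).foldl
        (fun acc index =>
          let number := PySem.List.pyGetD acc index 0
          if PySem.Int.mod number 2 = 0 then acc.set index.toNat (number - 2)
          else acc.set index.toNat (number + 2))
        return_list)
    lst

-- ===== PORT B =====
def even_odd_transform_alt (lst : List Int) (n : Int) : List Int :=
  let k := if 0 < n then 2 * n else 0
  lst.map (fun x => if PySem.Int.mod x 2 = 0 then x - k else x + k)

-- ===== PRECONDITION & SPEC =====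
def Spec_even_odd_transform (lst : List Int) (n : Int) (out : List Int) : Prop := out = even_odd_transform_alt lst n
instance (lst : List Int) (n : Int) (out : List Int) : Decidable (Spec_even_odd_transform lst n out) := by unfold Spec_even_odd_transform; infer_instance

-- ===== CLAIM (what is proved, stated in full; the proofs are below) =====
def Claim_equal_even_odd_transform : Prop := ∀ (lst : List Int) (n : Int), Dom_even_odd_transform lst n → Spec_even_odd_transform lst n (even_odd_transform lst n)

-- ===== LEMMAS AND PROOFS =====

-- one in-place sweep, written over Nat indices
def pvSweep (s : List Int) : List Int :=
  (List.range s.length).foldl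
    (fun acc k =>
      let number := acc.getD k 0
      if PySem.Int.mod number 2 = 0 then acc.set k (number - 2) else acc.set k (number + 2))
    s

def pvStep (x : Int) : Int := if PySem.Int.mod x 2 = 0 then x - 2 else x + 2

lemma pvSweep_aux (s pre : List Int) :
    (List.range' pre.length s.length).foldl
      (fun acc k =>
        let number := acc.getD k 0
        if PySem.Int.mod number 2 = 0 then acc.set k (number - 2) else acc.set k (number + 2))
      (pre ++ s) = pre ++ s.map pvStep := by
  induction s generalizing pre with
  | nil => simp
  | cons x s ih =>
    rw [List.length_cons, List.range'_succ, List.foldl_cons]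
    have hget : (pre ++ x :: s).getD pre.length 0 = x := by
      simp [List.getD]
    have hset : ∀ v, (pre ++ x :: s).set pre.length v = pre ++ v :: s := by
      intro v; rw [List.set_append]; simp
    simp only [hget, hset]
    have key : (if PySem.Int.mod x 2 = 0 then pre ++ (x - 2) :: s else pre ++ (x + 2) :: s)
        = (pre ++ [pvStep x]) ++ s := by
      unfold pvStep; split_ifs <;> simp
    rw [key, show pre.length + 1 = (pre ++ [pvStep x]).length by simp,
        ih (pre ++ [pvStep x])]
    simp

lemma pvSweep_eq_map (s : List Int) : pvSweep s = s.map pvStep := by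
  have := pvSweep_aux s []
  simpa [pvSweep, List.range_eq_range'] using this

lemma pvStep_parity (x : Int) : pvStep x = if x % 2 = 0 then x - 2 else x + 2 := by
  simp [pvStep]

-- the inner Python loop IS pvSweep
lemma inner_eq_sweep (s : List Int) :
    (PySem.List.pyRange 0 (s.length : Int) 1).foldl
      (fun acc index =>
        let number := PySem.List.pyGetD acc index 0
        if PySem.Int.mod number 2 = 0 then acc.set index.toNat (number - 2)
        else acc.set index.toNat (number + 2)) s = pvSweep s := by
  rw [PySem.List.pyRange_one, pvSweep]
  simp only [zero_add, Int.sub_zero, Int.toNat_natCast, List.foldl_map]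
  apply PySem.List.foldl_congr_mem
  intro acc k hk
  simp [PySem.List.pyGetD_natCast]

def pvClosed (m : Nat) (x : Int) : Int := if x % 2 = 0 then x - 2 * m else x + 2 * m

lemma pvStep_closed (m : Nat) (x : Int) : pvClosed m (pvStep x) = pvClosed (m + 1) x := by
  rw [pvStep_parity]
  unfold pvClosed
  by_cases hx : x % 2 = 0
  · have h : (x - 2) % 2 = 0 := by omega
    simp [hx, h]; ring
  · have h : ¬ (x + 2) % 2 = 0 := by omega
    simp [hx]; ring

lemma outer_aux (L : List Int) (s : List Int) :
    L.foldl (fun r _ => pvSweep r) s = s.map (pvClosed L.length) := by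
  induction L generalizing s with
  | nil =>
    simp only [List.foldl_nil, List.length_nil,
      show pvClosed 0 = fun x => x from funext fun x => by simp [pvClosed], List.map_id']
  | cons a L ih =>
    rw [List.foldl_cons, ih, pvSweep_eq_map, List.map_map]
    apply List.map_congr_left
    intro x _
    simp only [Function.comp_apply, pvStep_closed]
    simp [List.length_cons]

-- ===== VERDICT (by name: the statement is the Claim_ definition above) =====
theorem even_odd_transform_spec : Claim_equal_even_odd_transform := by
  intro lst n _
  unfold Spec_even_odd_transform even_odd_transform even_odd_transform_alt
  have hcongr : (PySem.List.pyRange 0 n 1).foldl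
      (fun return_list _ =>
        (PySem.List.pyRange 0 (return_list.length : Int) 1).foldl
          (fun acc index =>
            let number := PySem.List.pyGetD acc index 0
            if PySem.Int.mod number 2 = 0 then acc.set index.toNat (number - 2)
            else acc.set index.toNat (number + 2)) return_list) lst
      = (PySem.List.pyRange 0 n 1).foldl (fun r _ => pvSweep r) lst := by
    apply PySem.List.foldl_congr_mem
    intro acc i _
    exact inner_eq_sweep acc
  rw [hcongr, outer_aux, PySem.List.length_pyRange_one]
  apply List.map_congr_left
  intro x _
  have h2 : PySem.Int.mod x 2 = x % 2 := PySem.Int.mod_eq_emod_of_pos (by norm_num)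
  simp only [pvClosed, h2]
  split_ifs <;> omega
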